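-- pv_equiv track=rewrite | github.com/Likithgovind/LeetCode_challenge | Convert Integer to the Sum of Two No-Zero Integers.py | getNoZeroIntegers
-- ===== SOURCE A (Python) =====
-- def getNoZeroIntegers(n):
--     l=[]
--     for i in range(1,n+1):
--         for j in range(1,n+1):
--             if i+j==n:
--                 if "0" not in str(i) and "0" not in str(j):
--                     l.append(i)
--                     l.append(j)
--                     if len(l)==2:
--                         return l
--                         break
-- ===== SOURCE B (Python) =====
-- def getNoZeroIntegers(n):
--     def has_zero(x):
--         while x > 0:
--             if x % 10 == 0:
--                 return True
--             x //= 10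
--         return False
--     for i in range(1, n):
--         j = n - i
--         if not has_zero(i) and not has_zero(j):
--             return [i, j]
-- ===== Notes on version B (the rewrite author's own statement) =====
-- stated objective: faster
-- what changed: Replaced the O(n^2) nested scan over all (i,j) pairs and the string-based zero test by a single loop over i with j computed as n-i and an arithmetic digit loop for the no-zero test.
-- outside the precondition, e.g. on getNoZeroIntegers(1): A returns None, B returns None
import Mathlib
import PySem

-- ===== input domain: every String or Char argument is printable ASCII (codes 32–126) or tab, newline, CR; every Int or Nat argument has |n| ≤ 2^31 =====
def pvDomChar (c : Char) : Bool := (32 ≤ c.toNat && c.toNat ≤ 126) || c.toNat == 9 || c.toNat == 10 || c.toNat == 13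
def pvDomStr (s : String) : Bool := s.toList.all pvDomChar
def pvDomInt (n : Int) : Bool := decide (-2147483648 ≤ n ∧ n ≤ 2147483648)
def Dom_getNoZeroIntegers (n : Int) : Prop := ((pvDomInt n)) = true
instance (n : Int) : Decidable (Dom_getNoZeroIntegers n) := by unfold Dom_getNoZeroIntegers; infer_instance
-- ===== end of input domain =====

-- B replaces A's O(n^2) nested pair scan and string zero-test by a single loop with j = n - i
-- and an arithmetic digit test (objective: faster; measured).


-- ===== PORT A =====
-- '"0" not in str(k)'
def noZeroStr (k : Int) : Bool := !(PySem.Str.isIn "0" (PySem.Int.toStr k))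

-- nested 'for i in range(1,n+1): for j in range(1,n+1):' with early return, as findSome?;
-- Python returns None when nothing is found (excluded by Pre_), the port returns [] there.
def getNoZeroIntegers (n : Int) : List Int :=
  ((PySem.List.pyRange 1 (n+1) 1).findSome? (fun i =>
    (PySem.List.pyRange 1 (n+1) 1).findSome? (fun j =>
      if i + j = n then
        if noZeroStr i && noZeroStr j then some [i, j] else none
      else none))).getD []

-- ===== PORT B =====
-- 'while x > 0: if x % 10 == 0: return True; x //= 10; return False' — structural on a fuel
-- that starts at x itself (x//10 < x, so fuel x is exact for the Python loop).
def hasZeroAux : Nat → Nat → Bool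
  | 0, _ => false
  | f+1, x => if x = 0 then false else (x % 10 == 0 || hasZeroAux f (x / 10))

def hasZeroInt (x : Int) : Bool := hasZeroAux x.toNat x.toNat

-- single loop 'for i in range(1, n): j = n - i; …' with early return; [] where Python gives None.
def getNoZeroIntegers_alt (n : Int) : List Int :=
  ((PySem.List.pyRange 1 n 1).findSome? (fun i =>
    if !hasZeroInt i && !hasZeroInt (n - i) then some [i, n - i] else none)).getD []

-- ===== PRECONDITION & SPEC =====
-- Pre_ excludes n ≤ 1, where Python A falls off its loops and returns None (not a list
-- value); for every n ≥ 2 a zero-free split exists, so A returns a two-element list.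
def Pre_getNoZeroIntegers (n : Int) : Prop := 2 ≤ n
instance (n : Int) : Decidable (Pre_getNoZeroIntegers n) := by unfold Pre_getNoZeroIntegers; infer_instance
def pvWitness_getNoZeroIntegers : Int := (2)

def Spec_getNoZeroIntegers (n : Int) (out : List Int) : Prop := out = getNoZeroIntegers_alt n
instance (n : Int) (out : List Int) : Decidable (Spec_getNoZeroIntegers n out) := by unfold Spec_getNoZeroIntegers; infer_instance

-- ===== CLAIM (what is proved, stated in full; the proofs are below) =====
def Claim_equal_getNoZeroIntegers : Prop := ∀ (n : Int), Dom_getNoZeroIntegers n → Pre_getNoZeroIntegers n → Spec_getNoZeroIntegers n (getNoZeroIntegers n)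

-- ===== LEMMAS AND PROOFS =====

-- findSome? over a list whose function can only fire at one point a
theorem findSome?_single {α β : Type} [DecidableEq α] (L : List α) (f : α → Option β) (a : α)
    (h : ∀ x, x ≠ a → f x = none) :
    L.findSome? f = if a ∈ L then f a else none := by
  induction L with
  | nil => simp
  | cons x L ih =>
    by_cases hx : x = a
    · subst hx
      cases hfa : f x with
      | some b => simp [hfa]
      | none => simp [hfa, ih]
    · simp [h x hx, ih, show ¬ a = x from fun hax => hx hax.symm]

theorem findSome?_congr {α β : Type} (L : List α) (f g : α → Option β)
    (h : ∀ x ∈ L, f x = g x) : L.findSome? f = L.findSome? g := by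
  induction L with
  | nil => rfl
  | cons x L ih =>
    simp only [List.findSome?_cons, h x (List.mem_cons_self), ih (fun y hy => h y (List.mem_cons_of_mem _ hy))]

theorem pyRange_one_nil {a b : Int} (h : b ≤ a) : PySem.List.pyRange a b 1 = [] := by
  apply List.eq_nil_iff_forall_not_mem.mpr
  intro x hx
  rcases (PySem.List.mem_pyRange_iff_of_pos (by norm_num) x).mp hx with ⟨h1, h2, _⟩
  omega

theorem hasZeroAux_zero (f : Nat) : hasZeroAux f 0 = false := by cases f <;> simp [hasZeroAux]

theorem digitChar_eq_zero_iff (m : Nat) (hm : m < 10) : m.digitChar = '0' ↔ m = 0 := by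
  interval_cases m <;> decide

theorem mem_toDigits_iff (f : Nat) : ∀ x : Nat, 1 ≤ x → x ≤ f →
    ('0' ∈ Nat.toDigits 10 x ↔ hasZeroAux f x = true) := by
  induction f with
  | zero => intro x h1 h2; omega
  | succ f ih =>
    intro x h1 h2
    have hx0 : x ≠ 0 := by omega
    rw [show hasZeroAux (f+1) x = (x % 10 == 0 || hasZeroAux f (x / 10)) by
      simp [hasZeroAux, hx0]]
    by_cases hlt : x < 10
    · rw [Nat.toDigits_of_lt_base hlt]
      have hmod : x % 10 = x := Nat.mod_eq_of_lt hlt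
      have hdiv : x / 10 = 0 := Nat.div_eq_of_lt hlt
      simp [hdiv, hasZeroAux_zero, hmod]
      constructor
      · intro h; exact absurd (digitChar_eq_zero_iff x hlt |>.mp h.symm) hx0
      · intro h; omega
    · rw [Nat.toDigits_of_base_le (by norm_num) (by omega)]
      have hdiv1 : 1 ≤ x / 10 := Nat.one_le_div_iff (by norm_num) |>.mpr (by omega)
      have hdivf : x / 10 ≤ f := by
        have := Nat.div_lt_self (by omega : 0 < x) (by norm_num : 1 < 10)
        omega
      rw [List.mem_append]
      have hm := Nat.mod_lt x (by norm_num : 0 < 10)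
      simp only [List.mem_singleton, ih (x / 10) hdiv1 hdivf, Bool.or_eq_true, beq_iff_eq]
      constructor
      · rintro (h | h)
        · exact Or.inr h
        · exact Or.inl ((digitChar_eq_zero_iff _ hm).mp h.symm)
      · rintro (h | h)
        · exact Or.inr (((digitChar_eq_zero_iff _ hm).mpr h).symm)
        · exact Or.inl h

-- A's string test agrees with B's digit test on positive integers
theorem noZeroStr_eq (k : Int) (hk : 1 ≤ k) : noZeroStr k = !hasZeroInt k := by
  unfold noZeroStr hasZeroInt
  congr 1
  rw [PySem.Str.isIn_eq, PySem.Int.toList_toStr]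
  have hneg : ¬ k < 0 := by omega
  rw [show PySem.Int.toChars k = Nat.toDigits 10 k.toNat by simp [PySem.Int.toChars, hneg]]
  have h1 : 1 ≤ k.toNat := by omega
  rw [Bool.eq_iff_iff, PySem.Chars.isIn_iff_infix]
  rw [show ("0" : String).toList = ['0'] from rfl]
  rw [List.singleton_infix_iff]
  exact mem_toDigits_iff k.toNat k.toNat h1 le_rfl

theorem main_eq (n : Int) (hn : 2 ≤ n) : getNoZeroIntegers n = getNoZeroIntegers_alt n := by
  unfold getNoZeroIntegers getNoZeroIntegers_alt
  -- collapse A's inner scan: for each i the guard i + j = n fires only at j = n - i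
  have hstep : ∀ i ∈ PySem.List.pyRange 1 (n+1) 1,
      (PySem.List.pyRange 1 (n+1) 1).findSome? (fun j =>
        if i + j = n then
          if noZeroStr i && noZeroStr j then some [i, j] else none
        else none)
      = if i < n ∧ (!hasZeroInt i && !hasZeroInt (n - i)) = true then some [i, n - i] else none := by
    intro i hi
    rcases (PySem.List.mem_pyRange_iff_of_pos (by norm_num) i).mp hi with ⟨h1, h2, _⟩
    rw [findSome?_single _ _ (n - i) (by intro x hx; simp; intro h; omega)]
    by_cases hlt : i < n
    · have hmem : (n - i) ∈ PySem.List.pyRange 1 (n+1) 1 := by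
        rw [PySem.List.mem_pyRange_iff_of_pos (by norm_num)]
        exact ⟨by omega, by omega, by simp⟩
      rw [if_pos hmem, if_pos (show i + (n - i) = n by ring)]
      rw [noZeroStr_eq i h1, noZeroStr_eq (n - i) (by omega)]
      by_cases hc : (!hasZeroInt i && !hasZeroInt (n - i)) = true
      · rw [if_pos hc, if_pos ⟨hlt, hc⟩]
      · rw [if_neg hc, if_neg (by tauto)]
    · have hnm : (n - i) ∉ PySem.List.pyRange 1 (n+1) 1 := by
        intro hmem
        rcases (PySem.List.mem_pyRange_iff_of_pos (by norm_num) (n - i)).mp hmem with ⟨ha, _, _⟩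
        omega
      rw [if_neg hnm, if_neg (by tauto)]
  rw [findSome?_congr (PySem.List.pyRange 1 (n+1) 1) _ _ hstep]
  -- split off A's extra outer index i = n, which finds nothing
  rw [PySem.List.pyRange_one_append 1 n (n+1) (by omega) (by omega), List.findSome?_append]
  rw [PySem.List.pyRange_one_cons (by omega : n < n + 1), pyRange_one_nil (le_refl (n+1))]
  have hlast : List.findSome?
      (fun i => if i < n ∧ (!hasZeroInt i && !hasZeroInt (n - i)) = true then some [i, n - i] else none)
      [n] = none := by simp
  rw [hlast, Option.or_none]
  congr 1
  apply findSome?_congr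
  intro i hi
  rcases (PySem.List.mem_pyRange_iff_of_pos (by norm_num) i).mp hi with ⟨h1, h2, _⟩
  simp [h2]

-- ===== VERDICT (by name: the statement is the Claim_ definition above) =====
theorem getNoZeroIntegers_spec : Claim_equal_getNoZeroIntegers := by
  intro n _ hpre
  unfold Spec_getNoZeroIntegers
  exact (main_eq n hpre).symm ▸ rfl
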